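-- pv_equiv track=rewrite | github.com/SaberCon/algorithm-python | 1001_1100/1090.py | largestValsFromLabels
-- ===== SOURCE A (Python) =====
-- from typing import List
--
-- from collections import defaultdict
--
-- def largestValsFromLabels(values: List[int], labels: List[int], numWanted: int, useLimit: int) -> int:
--     counts = defaultdict(lambda: 0)
--     count = 0
--     ans = 0
--     for value, label in sorted(zip(values, labels), reverse=True):
--         if counts[label] == useLimit:
--             continue
--         counts[label] += 1
--         count += 1
--         ans += value
--         if count == numWanted:
--             break
--     return ans
-- ===== SOURCE B (Python) =====
-- def largestValsFromLabels(values, labels, numWanted, useLimit):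
--     groups = {}
--     for value, label in zip(values, labels):
--         groups.setdefault(label, []).append(value)
--     pool = []
--     for vals in groups.values():
--         vals.sort(reverse=True)
--         pool.extend(vals[:max(useLimit, 0)])
--     pool.sort(reverse=True)
--     ans = count = 0
--     for value in pool:
--         ans += value
--         count += 1
--         if count == numWanted:
--             break
--     return ans
-- ===== Notes on version B (the rewrite author's own statement) =====
-- stated objective: alternative
-- what changed: B builds a per-label dict of values in one pass, sorts each group and keeps only its top useLimit entries, then sorts the single truncated pool and sums with the break-on-count loop, instead of A's one global reverse sort of (value,label) pairs scanned with per-label counters.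
-- intended difference: On inputs with useLimit < 0 and nonempty values/labels, A's test counts[label] == useLimit never fires so A ignores the limit and returns the sum of the top numWanted values, while B treats a negative limit as allowing no items per label and returns 0, the intended reading of 'use at most useLimit items of each label'. — e.g. on largestValsFromLabels([5], [1], 1, -1): A returns 5, B returns 0
import Mathlib
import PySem

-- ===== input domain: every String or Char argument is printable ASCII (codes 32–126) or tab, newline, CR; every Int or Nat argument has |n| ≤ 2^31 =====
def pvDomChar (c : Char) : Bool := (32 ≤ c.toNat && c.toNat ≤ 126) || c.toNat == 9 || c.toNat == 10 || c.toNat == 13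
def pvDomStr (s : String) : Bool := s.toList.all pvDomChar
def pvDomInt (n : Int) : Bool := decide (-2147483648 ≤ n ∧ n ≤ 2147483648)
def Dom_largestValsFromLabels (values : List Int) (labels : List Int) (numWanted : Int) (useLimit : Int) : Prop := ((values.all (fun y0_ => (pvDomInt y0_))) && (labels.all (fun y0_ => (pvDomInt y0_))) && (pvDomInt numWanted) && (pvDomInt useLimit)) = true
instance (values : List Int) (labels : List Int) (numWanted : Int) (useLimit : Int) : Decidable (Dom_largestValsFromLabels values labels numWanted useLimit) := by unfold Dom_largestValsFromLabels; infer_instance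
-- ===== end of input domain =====

-- B groups the values per label, truncates each group to its limit, and sorts one truncated pool,
-- instead of A's single global pair sort scanned with per-label counters (objective: alternative
-- decomposition, same asymptotic cost).

-- ===== PORT A =====
-- the loop body of A: for value, label in sorted(zip(values, labels), reverse=True): …
-- (counts[label] on the defaultdict reads 0 when absent; the default it stores is 0, so any
-- later read of that key yields the same value as getD)
def aloop (numWanted useLimit : Int) : List (Int × Int) → PySem.Dict Int Int → Int → Int → Int
  | [], _, _, ans => ans
  | (value, label) :: rest, counts, count, ans =>
    if counts.getD label 0 == useLimit then
      aloop numWanted useLimit rest counts count ans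
    else
      if count + 1 == numWanted then ans + value
      else aloop numWanted useLimit rest
             (counts.insert label (counts.getD label 0 + 1)) (count + 1) (ans + value)

def largestValsFromLabels (values : List Int) (labels : List Int) (numWanted : Int) (useLimit : Int) : Int :=
  aloop numWanted useLimit
    (PySem.List.sorted2 (values.zip labels) Prod.fst Prod.snd true)
    PySem.Dict.empty 0 0

-- ===== PORT B =====
-- the grouping loop: for value, label in zip(values, labels): groups.setdefault(label, []).append(value)
def bGroups (pairs : List (Int × Int)) : PySem.Dict Int (List Int) :=
  pairs.foldl (fun g p => g.modify p.2 [] (fun vs => vs ++ [p.1])) PySem.Dict.empty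

-- the pool loop: for vals in groups.values(): vals.sort(reverse=True); pool.extend(vals[:max(useLimit, 0)])
def bPool (useLimit : Int) (g : PySem.Dict Int (List Int)) : List Int :=
  g.values.foldl
    (fun pool vals =>
      pool ++ PySem.List.slice (PySem.List.sorted vals (fun v => v) true) none (some (max useLimit 0)))
    []

-- the summing loop: for value in pool: ans += value; count += 1; if count == numWanted: break
def bsum (numWanted : Int) : List Int → Int → Int → Int
  | [], _, ans => ans
  | v :: rest, count, ans =>
    if count + 1 == numWanted then ans + v
    else bsum numWanted rest (count + 1) (ans + v)

def largestValsFromLabels_alt (values : List Int) (labels : List Int) (numWanted : Int) (useLimit : Int) : Int :=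
  bsum numWanted
    (PySem.List.sorted (bPool useLimit (bGroups (values.zip labels))) (fun v => v) true)
    0 0

-- ===== PRECONDITION & SPEC =====
-- For negative useLimit (with any items at all), A's test counts[label] == useLimit never fires,
-- so A ignores the limit and returns the sum of the top numWanted values, while B lets a negative
-- limit allow no items per label and returns 0 — the intended reading of "use at most useLimit items".
def D_largestValsFromLabels (values : List Int) (labels : List Int) (numWanted : Int) (useLimit : Int) : Prop :=
  useLimit < 0 ∧ values ≠ [] ∧ labels ≠ []
instance (values : List Int) (labels : List Int) (numWanted : Int) (useLimit : Int) : Decidable (D_largestValsFromLabels values labels numWanted useLimit) := by unfold D_largestValsFromLabels; infer_instance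

def Spec_largestValsFromLabels (values : List Int) (labels : List Int) (numWanted : Int) (useLimit : Int) (out : Int) : Prop := ¬ D_largestValsFromLabels values labels numWanted useLimit → out = largestValsFromLabels_alt values labels numWanted useLimit
instance (values : List Int) (labels : List Int) (numWanted : Int) (useLimit : Int) (out : Int) : Decidable (Spec_largestValsFromLabels values labels numWanted useLimit out) := by unfold Spec_largestValsFromLabels; infer_instance

def pvDiffWitness_largestValsFromLabels : List Int × List Int × Int × Int := ([5], [1], 1, -1)
def pvDiffWitnessOut_largestValsFromLabels : Int × Int := (5, 0)

-- ===== CLAIM (what is proved, stated in full; the proofs are below) =====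
def Claim_unchanged_largestValsFromLabels : Prop := ∀ (values : List Int) (labels : List Int) (numWanted : Int) (useLimit : Int), Dom_largestValsFromLabels values labels numWanted useLimit → Spec_largestValsFromLabels values labels numWanted useLimit (largestValsFromLabels values labels numWanted useLimit)
def Claim_changed_largestValsFromLabels : Prop := Dom_largestValsFromLabels (pvDiffWitness_largestValsFromLabels.1) (pvDiffWitness_largestValsFromLabels.2.1) (pvDiffWitness_largestValsFromLabels.2.2.1) (pvDiffWitness_largestValsFromLabels.2.2.2) ∧ D_largestValsFromLabels (pvDiffWitness_largestValsFromLabels.1) (pvDiffWitness_largestValsFromLabels.2.1) (pvDiffWitness_largestValsFromLabels.2.2.1) (pvDiffWitness_largestValsFromLabels.2.2.2) ∧ largestValsFromLabels (pvDiffWitness_largestValsFromLabels.1) (pvDiffWitness_largestValsFromLabels.2.1) (pvDiffWitness_largestValsFromLabels.2.2.1) (pvDiffWitness_largestValsFromLabels.2.2.2) = pvDiffWitnessOut_largestValsFromLabels.1 ∧ largestValsFromLabels_alt (pvDiffWitness_largestValsFromLabels.1) (pvDiffWitness_largestValsFromLabels.2.1) (pvDiffWitness_largestValsFromLabels.2.2.1)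 (pvDiffWitness_largestValsFromLabels.2.2.2) = pvDiffWitnessOut_largestValsFromLabels.2 ∧ pvDiffWitnessOut_largestValsFromLabels.1 ≠ pvDiffWitnessOut_largestValsFromLabels.2

-- ===== LEMMAS AND PROOFS =====

-- the values of the pairs carrying label l, in list order
def labelVals (l : Int) (xs : List (Int × Int)) : List Int :=
  (xs.filter (fun p => p.2 == l)).map Prod.fst

-- the sublist of values A's counter logic admits (first useLimit occurrences per label)
def flt (U : Int) : List (Int × Int) → PySem.Dict Int Int → List Int
  | [], _ => []
  | (v, l) :: rest, counts =>
    if counts.getD l 0 == U then flt U rest counts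
    else v :: flt U rest (counts.insert l (counts.getD l 0 + 1))

-- A's loop is the break-on-count sum of the counter-filtered list
lemma aloop_eq_bsum_flt (nw U : Int) (xs : List (Int × Int)) :
    ∀ (c : PySem.Dict Int Int) (cnt ans : Int),
      aloop nw U xs c cnt ans = bsum nw (flt U xs c) cnt ans := by
  induction xs with
  | nil => intro c cnt ans; rfl
  | cons p rest ih =>
    obtain ⟨v, l⟩ := p
    intro c cnt ans
    simp only [aloop, flt]
    by_cases h : c.getD l 0 == U
    · simp [h, ih]
    · simp [h, bsum, ih]

-- Python's reverse sort of (value, label) pairs is the reverse sort under the lexicographic order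
lemma sorted2_eq_sorted_lex (xs : List (Int × Int)) :
    PySem.List.sorted2 xs Prod.fst Prod.snd true
      = PySem.List.sorted xs (fun p => (toLex p : Lex (Int × Int))) true := by
  have hbef : (fun a b : Int × Int => decide (b.1 < a.1) || (!decide (a.1 < b.1) && decide (b.2 < a.2)))
      = (fun a b : Int × Int => decide ((toLex b : Lex (Int × Int)) < toLex a)) := by
    funext a b
    by_cases h1 : b.1 < a.1 <;> by_cases h2 : a.1 < b.1 <;> by_cases h3 : b.2 < a.2 <;>
      simp [Prod.Lex.lt_iff, h1, h2, h3] <;> omega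
  show List.foldl (fun acc x => PySem.List.insertBy (fun a b : Int × Int => decide (b.1 < a.1) || (!decide (a.1 < b.1) && decide (b.2 < a.2))) x acc) [] xs
     = List.foldl (fun acc x => PySem.List.insertBy (fun a b : Int × Int => decide ((toLex b : Lex (Int × Int)) < toLex a)) x acc) [] xs
  rw [hbef]

lemma flt_sublist (U : Int) (xs : List (Int × Int)) :
    ∀ c, (flt U xs c).Sublist (xs.map Prod.fst) := by
  induction xs with
  | nil => intro c; simp [flt]
  | cons p rest ih =>
    obtain ⟨v, l⟩ := p
    intro c
    simp only [flt, List.map_cons]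
    by_cases h : c.getD l 0 == U
    · simp only [if_pos h]; exact (ih c).trans (List.sublist_cons_self _ _)
    · simp only [if_neg h]; exact (ih _).cons₂ v

lemma map_fst_pairwise {xs : List (Int × Int)}
    (h : xs.Pairwise (fun a b => (toLex b : Lex (Int × Int)) ≤ toLex a)) :
    (xs.map Prod.fst).Pairwise (fun x y : Int => y ≤ x) := by
  rw [List.pairwise_map]
  refine h.imp ?_
  intro a b hle
  rw [Prod.Lex.le_iff] at hle
  rcases hle with h1 | ⟨h1, _⟩
  · exact le_of_lt h1
  · exact le_of_eq h1

lemma labelVals_cons (l' v l : Int) (rest : List (Int × Int)) :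
    labelVals l' ((v, l) :: rest)
      = if l = l' then v :: labelVals l' rest else labelVals l' rest := by
  simp only [labelVals, List.filter_cons]
  by_cases h : l = l' <;> simp [h]

lemma labelVals_eq_nil_of_not_mem {l : Int} {xs : List (Int × Int)}
    (h : l ∉ xs.map Prod.snd) : labelVals l xs = [] := by
  simp only [labelVals, List.map_eq_nil_iff, List.filter_eq_nil_iff]
  intro p hp hbeq
  exact h (List.mem_map.mpr ⟨p, hp, by simpa using hbeq⟩)

-- two descending lists of ints that are permutations of one another are equal
lemma desc_eq_of_perm {l₁ l₂ : List Int}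
    (h₁ : l₁.Pairwise (fun x y : Int => y ≤ x))
    (h₂ : l₂.Pairwise (fun x y : Int => y ≤ x))
    (hp : l₁.Perm l₂) : l₁ = l₂ :=
  hp.eq_of_pairwise (fun _ _ _ _ hab hba => le_antisymm hba hab) h₁ h₂

lemma coe_flatMap (g : Int → List Int) (xs : List Int) :
    ((xs.flatMap g : List Int) : Multiset Int)
      = (xs.map (fun x => ((g x : List Int) : Multiset Int))).sum := by
  induction xs with
  | nil => rfl
  | cons x rest ih =>
    rw [List.flatMap_cons, List.map_cons, List.sum_cons, ← ih, ← Multiset.coe_add]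

-- the multiset A's counter filter keeps: per label, its first (useLimit − already-used) values
lemma flt_multiset (U : Int) :
    ∀ (xs : List (Int × Int)) (c : PySem.Dict Int Int),
      (∀ l, 0 ≤ c.getD l 0 ∧ c.getD l 0 ≤ U) →
      ((flt U xs c : List Int) : Multiset Int)
        = ∑ l ∈ (xs.map Prod.snd).toFinset,
            (((labelVals l xs).take (U - c.getD l 0).toNat : List Int) : Multiset Int) := by
  intro xs
  induction xs with
  | nil => intro c _; simp [flt]
  | cons p rest ih =>
    obtain ⟨v, l⟩ := p
    intro c hc
    have hcons : ∀ l' : Int, labelVals l' ((v, l) :: rest)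
        = if l = l' then v :: labelVals l' rest else labelVals l' rest := fun l' => labelVals_cons l' v l rest
    simp only [flt, List.map_cons, List.toFinset_cons]
    by_cases h : c.getD l 0 == U
    · -- skip branch: the l-term is a take-0, i.e. zero, on both sides
      have hl : c.getD l 0 = U := by simpa using h
      rw [if_pos h, ih c hc]
      have hterm : ∀ l' ∈ insert l (rest.map Prod.snd).toFinset,
          (((labelVals l' ((v, l) :: rest)).take (U - c.getD l' 0).toNat : List Int) : Multiset Int)
            = (((labelVals l' rest).take (U - c.getD l' 0).toNat : List Int) : Multiset Int) := by
        intro l' _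
        rw [hcons l']
        by_cases hll : l = l'
        · subst hll
          rw [if_pos rfl, hl]
          simp
        · rw [if_neg hll]
      rw [Finset.sum_congr rfl hterm]
      rcases Finset.decidableMem l (rest.map Prod.snd).toFinset with hmem | hmem
      · rw [Finset.sum_insert hmem]
        have : labelVals l rest = [] := labelVals_eq_nil_of_not_mem (by simpa using hmem)
        rw [this]
        simp
      · rw [Finset.insert_eq_self.mpr hmem]
    · -- take branch: v joins the l-term, whose remaining quota drops by one
      have hl : c.getD l 0 ≠ U := by simpa using h
      have hlt : c.getD l 0 < U := lt_of_le_of_ne (hc l).2 hl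
      rw [if_neg h]
      have hc' : ∀ l', 0 ≤ (c.insert l (c.getD l 0 + 1)).getD l' 0 ∧ (c.insert l (c.getD l 0 + 1)).getD l' 0 ≤ U := by
        intro l'
        rw [PySem.Dict.getD_insert]
        split_ifs with hll
        · have := hc l
          omega
        · exact hc l'
      rw [← Multiset.cons_coe, ih _ hc']
      have htak : (U - c.getD l 0).toNat = (U - (c.getD l 0 + 1)).toNat + 1 := by omega
      by_cases hmem : l ∈ (rest.map Prod.snd).toFinset
      · rw [Finset.insert_eq_self.mpr hmem]
        rw [← Finset.add_sum_erase _ _ hmem, ← Finset.add_sum_erase _ _ hmem]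
        rw [hcons l, if_pos rfl, htak, PySem.Dict.getD_insert, if_pos rfl]
        rw [List.take_succ_cons, ← Multiset.cons_coe]
        rw [Multiset.cons_add]
        congr 1
        congr 1
        apply Finset.sum_congr rfl
        intro l' hl'
        have hne : l' ≠ l := (Finset.mem_erase.mp hl').1
        rw [hcons l', if_neg (Ne.symm hne), PySem.Dict.getD_insert, if_neg hne]
      · rw [Finset.sum_insert hmem]
        have hnil : labelVals l rest = [] := labelVals_eq_nil_of_not_mem (by simpa using hmem)
        rw [hcons l, if_pos rfl, htak, hnil, List.take_succ_cons, List.take_nil, ← Multiset.cons_coe]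
        rw [Multiset.cons_add, show (([] : List Int) : Multiset Int) = 0 from rfl, zero_add]
        congr 1
        apply Finset.sum_congr rfl
        intro l' hl'
        have hne : l' ≠ l := by rintro rfl; exact hmem hl'
        rw [hcons l', if_neg (Ne.symm hne), PySem.Dict.getD_insert, if_neg hne]

lemma bGroups_eq_swap (pairs : List (Int × Int)) :
    bGroups pairs
      = (pairs.map (fun p => (p.2, p.1))).foldl
          (fun d p => d.modify p.1 [] (fun vs => vs ++ [p.2])) PySem.Dict.empty := by
  rw [List.foldl_map]; rfl

lemma bGroups_getD (pairs : List (Int × Int)) (l : Int) :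
    (bGroups pairs).getD l [] = labelVals l pairs := by
  rw [bGroups_eq_swap, PySem.Dict.getD_foldl_modify_append]
  simp [labelVals, List.filter_map, List.map_map, Function.comp_def]

lemma bGroups_keys (pairs : List (Int × Int)) :
    (bGroups pairs).keys = PySem.Set.ofList (pairs.map Prod.snd) := by
  rw [bGroups_eq_swap]
  have h := PySem.Dict.keys_foldl_modify_key (pairs.map (fun p => (p.2, p.1)))
    (fun p : Int × Int => p.1) ([] : List Int) (fun _ p vs => vs ++ [p.2]) PySem.Dict.empty
  simp only at h
  rw [h]
  simp [PySem.Set.update, PySem.Set.ofList_eq_foldl, List.foldl_map]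

lemma bGroups_keys_nodup (pairs : List (Int × Int)) : (bGroups pairs).keys.Nodup := by
  rw [bGroups_keys]; exact PySem.Set.nodup_ofList _

-- the multiset B pools: per label, the top useLimit values of its group
lemma pool_multiset (U : Int) (hU : 0 ≤ U) (pairs : List (Int × Int)) :
    ((bPool U (bGroups pairs) : List Int) : Multiset Int)
      = ∑ l ∈ (pairs.map Prod.snd).toFinset,
          (((PySem.List.sorted (labelVals l pairs) (fun v => v) true).take U.toNat : List Int) : Multiset Int) := by
  have hmax : max U 0 = U := max_eq_left hU
  have hslice : ∀ vals : List Int,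
      PySem.List.slice (PySem.List.sorted vals (fun v => v) true) none (some (max U 0))
        = (PySem.List.sorted vals (fun v => v) true).take U.toNat := by
    intro vals; rw [PySem.List.slice_to _ (by omega), hmax]
  unfold bPool
  rw [PySem.List.foldl_append_eq_flatMap, List.nil_append]
  rw [PySem.Dict.values_eq_map_keys _ (bGroups_keys_nodup pairs) []]
  simp only [hslice]
  rw [List.flatMap_map, coe_flatMap]
  simp only [bGroups_getD]
  rw [bGroups_keys]
  have hfin : ((PySem.Set.ofList (pairs.map Prod.snd) : List Int)).toFinset = (pairs.map Prod.snd).toFinset := by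
    ext a; simp [List.mem_toFinset, PySem.Set.mem_ofList]
  rw [← hfin, List.sum_toFinset _ (PySem.Set.nodup_ofList _)]

-- the label-l values of the reverse-sorted pair list ARE the reverse-sorted label-l group
lemma labelVals_sorted (pairs : List (Int × Int)) (l : Int) :
    labelVals l (PySem.List.sorted pairs (fun p => (toLex p : Lex (Int × Int))) true)
      = PySem.List.sorted (labelVals l pairs) (fun v => v) true := by
  apply desc_eq_of_perm
  · exact map_fst_pairwise ((PySem.List.sorted_pairwise_rev pairs _).filter _)
  · exact PySem.List.sorted_pairwise_rev _ _
  · have h1 : (PySem.List.sorted pairs (fun p => (toLex p : Lex (Int × Int))) true).Perm pairs :=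
      PySem.List.sorted_perm _ _ _
    have h2 : (labelVals l (PySem.List.sorted pairs (fun p => (toLex p : Lex (Int × Int))) true)).Perm
        (labelVals l pairs) := (h1.filter _).map _
    exact h2.trans (PySem.List.sorted_perm _ _ _).symm

-- the main case: for 0 ≤ useLimit the two programs agree
theorem main_eq (values labels : List Int) (nw U : Int) (hU : 0 ≤ U) :
    largestValsFromLabels values labels nw U = largestValsFromLabels_alt values labels nw U := by
  unfold largestValsFromLabels largestValsFromLabels_alt
  rw [sorted2_eq_sorted_lex, aloop_eq_bsum_flt]
  congr 1
  set pairs := values.zip labels with hp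
  set S := PySem.List.sorted pairs (fun p => (toLex p : Lex (Int × Int))) true with hS
  apply desc_eq_of_perm
  · exact List.Pairwise.sublist (flt_sublist U S PySem.Dict.empty)
      (map_fst_pairwise (PySem.List.sorted_pairwise_rev pairs _))
  · exact PySem.List.sorted_pairwise_rev _ _
  · rw [← Multiset.coe_eq_coe]
    have hempty : ∀ l : Int, 0 ≤ (PySem.Dict.empty : PySem.Dict Int Int).getD l 0
        ∧ (PySem.Dict.empty : PySem.Dict Int Int).getD l 0 ≤ U := by
      intro l; simp [PySem.Dict.getD_empty]; exact hU
    rw [flt_multiset U S PySem.Dict.empty hempty]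
    have hsp : S.Perm pairs := PySem.List.sorted_perm _ _ _
    have hfin : (S.map Prod.snd).toFinset = (pairs.map Prod.snd).toFinset :=
      List.toFinset_eq_of_perm _ _ (hsp.map _)
    have hcoe : ((PySem.List.sorted (bPool U (bGroups pairs)) (fun v => v) true : List Int) : Multiset Int)
        = ((bPool U (bGroups pairs) : List Int) : Multiset Int) :=
      Multiset.coe_eq_coe.mpr (PySem.List.sorted_perm _ _ _)
    rw [hcoe, pool_multiset U hU pairs, ← hfin]
    apply Finset.sum_congr rfl
    intro l _
    rw [PySem.Dict.getD_empty, labelVals_sorted]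
    norm_num

-- ===== VERDICT (by name: the statement is the Claim_ definition above) =====
theorem largestValsFromLabels_spec : Claim_unchanged_largestValsFromLabels := by
  intro values labels numWanted useLimit _ hnD
  by_cases hU : 0 ≤ useLimit
  · exact main_eq values labels numWanted useLimit hU
  · have hdeg : values = [] ∨ labels = [] := by
      by_contra hc
      push_neg at hc
      exact hnD ⟨by omega, hc.1, hc.2⟩
    rcases hdeg with rfl | rfl
    · rfl
    · unfold largestValsFromLabels largestValsFromLabels_alt
      rw [List.zip_nil_right]
      rfl

theorem largestValsFromLabels_changed : Claim_changed_largestValsFromLabels := by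
  unfold Claim_changed_largestValsFromLabels; decide
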